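-- pv_equiv track=rewrite | github.com/Olga-Chichikina/PytonZad | DZ1/zad2.py | LogProiz
-- ===== SOURCE A (Python) =====
-- def LogProiz(list):
--     proiz=1
--     for i in range(len(list)): #  логическое умножение
--         if list[i] == 0:    # инверсия
--             list[i] = 1
--         else:
--             list[i] = 0
--         proiz= proiz*list[i]
--     return proiz
-- ===== SOURCE B (Python) =====
-- def LogProiz(list):
--     # Phase 1: in-place inversion (same side effect as A)
--     for i, v in enumerate(list):
--         list[i] = 1 if v == 0 else 0
--     # Phase 2: result as a boolean all-check instead of a running product
--     return 1 if all(list) else 0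
-- ===== Notes on version B (the rewrite author's own statement) =====
-- stated objective: idiomatic
-- what changed: Splits A's fused loop into an in-place inversion pass plus a separate all() truthiness check replacing the running product.
import Mathlib
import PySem

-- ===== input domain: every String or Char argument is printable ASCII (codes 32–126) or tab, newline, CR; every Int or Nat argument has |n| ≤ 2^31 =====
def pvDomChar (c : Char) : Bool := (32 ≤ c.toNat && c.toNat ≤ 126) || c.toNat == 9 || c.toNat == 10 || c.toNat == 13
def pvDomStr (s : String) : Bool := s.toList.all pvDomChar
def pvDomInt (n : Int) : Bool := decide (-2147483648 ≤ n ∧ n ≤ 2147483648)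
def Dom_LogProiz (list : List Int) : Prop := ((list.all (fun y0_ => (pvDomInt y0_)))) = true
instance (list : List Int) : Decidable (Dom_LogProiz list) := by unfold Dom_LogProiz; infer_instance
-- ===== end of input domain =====

-- B separates the in-place inversion pass from the reduction (all-check instead of a
-- running product). Both A and B mutate the Python argument identically (inversion in
-- place); the equivalence proved here is about the RETURN value.

-- ===== PORT A =====
-- A's loop carries the mutated list and the running product together; ported as one
-- fold over the elements with state (rebuilt list, proiz).
def LogProiz (list : List Int) : Int :=
  (list.foldl
    (fun (st : List Int × Int) v =>
      let nv : Int := if v = 0 then 1 else 0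
      (st.1 ++ [nv], st.2 * nv))
    ([], 1)).2

-- ===== PORT B =====
-- B: build the inverted list in a first pass, then a separate all()-style check
-- (Python truthiness: nonzero) decides the result.
def LogProiz_alt (list : List Int) : Int :=
  let inverted := list.map (fun v => if v = 0 then (1 : Int) else 0)
  if inverted.all (fun x => x != 0) then 1 else 0

-- ===== PRECONDITION & SPEC =====
def Spec_LogProiz (list : List Int) (out : Int) : Prop := out = LogProiz_alt list
instance (list : List Int) (out : Int) : Decidable (Spec_LogProiz list out) := by unfold Spec_LogProiz; infer_instance

-- ===== CLAIM (what is proved, stated in full; the proofs are below) =====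
def Claim_equal_LogProiz : Prop := ∀ (list : List Int), Dom_LogProiz list → Spec_LogProiz list (LogProiz list)

-- ===== LEMMAS AND PROOFS =====

-- A's accumulated product equals st.2 times "1 if every element is 0 else 0".
theorem LogProiz_foldl_snd (l : List Int) (st : List Int × Int) :
    (l.foldl
      (fun (st : List Int × Int) v =>
        let nv : Int := if v = 0 then 1 else 0
        (st.1 ++ [nv], st.2 * nv))
      st).2 = st.2 * (if l.all (fun v => v == 0) then 1 else 0) := by
  induction l generalizing st with
  | nil => simp
  | cons a l ih =>
    simp only [List.foldl_cons, List.all_cons]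
    rw [ih]
    by_cases h : a = 0 <;> simp [h]

theorem LogProiz_spec : Claim_equal_LogProiz := by
  intro list _
  unfold Spec_LogProiz LogProiz LogProiz_alt
  rw [LogProiz_foldl_snd]
  simp only [one_mul]
  congr 1
  induction list with
  | nil => simp
  | cons a l ih =>
    simp only [List.all_cons, List.map_cons]
    by_cases h : a = 0 <;> simp [h]
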